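-- pv_equiv track=rewrite | github.com/zeroheat0930/coding-practice | 프로그래머스/unrated/181926. 수 조작하기 1/수 조작하기 1.py | solution
-- ===== SOURCE A (Python) =====
-- def solution(n, control):
--     answer = 0
--     b = n
--     for num in control:
--         if num == "w":
--             b = b+1
--         elif num == "s":
--             b = b-1
--         elif num == "d":
--             b = b+10
--         elif num == "a":
--             b = b-10
--     return b
-- ===== SOURCE B (Python) =====
-- def _effect(s):
--     # total adjustment of a control string, by divide and conquer:
--     # split in half, recurse, add (the adjustment is additive over concatenation)
--     if len(s) == 0:
--         return 0
--     if len(s) == 1: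
--         if s == "w":
--             return 1
--         if s == "s":
--             return -1
--         if s == "d":
--             return 10
--         if s == "a":
--             return -10
--         return 0
--     m = len(s) // 2
--     return _effect(s[:m]) + _effect(s[m:])
--
-- def solution(n, control):
--     return n + _effect(control)
-- ===== Notes on version B (the rewrite author's own statement) =====
-- stated objective: alternative
-- what changed: Replaced the left-to-right accumulator loop with a divide-and-conquer recursion: the string is split in half, each half's total adjustment is computed recursively down to single characters, and the two totals are added (correct because the adjustment is additive over concatenation).
import Mathlib
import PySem

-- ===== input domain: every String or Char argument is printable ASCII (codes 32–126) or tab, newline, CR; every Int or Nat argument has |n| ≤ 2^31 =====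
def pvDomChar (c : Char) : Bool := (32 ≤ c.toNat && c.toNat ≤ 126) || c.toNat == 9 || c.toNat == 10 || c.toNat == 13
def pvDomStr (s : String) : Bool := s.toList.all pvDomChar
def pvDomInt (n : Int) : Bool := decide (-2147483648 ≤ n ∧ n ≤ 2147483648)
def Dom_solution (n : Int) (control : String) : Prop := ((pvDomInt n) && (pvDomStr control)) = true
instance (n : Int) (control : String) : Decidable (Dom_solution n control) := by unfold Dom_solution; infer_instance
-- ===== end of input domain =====

-- B replaces A's accumulator loop with a divide-and-conquer recursion on string halves (alternative decomposition, same cost).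

-- ===== PORT A =====
-- literal port of A: fold over the characters with the running value b (A's unused 'answer = 0' is dropped)
def solution (n : Int) (control : String) : Int :=
  control.toList.foldl
    (fun b num =>
      if num == 'w' then b + 1
      else if num == 's' then b - 1
      else if num == 'd' then b + 10
      else if num == 'a' then b - 10
      else b)
    n

-- ===== PORT B =====
-- literal port of Source B's _effect: split in half, recurse, add
def solutionEffect (l : List Char) : Int :=
  if l.length = 0 then 0
  else if l.length = 1 then
    -- Source B compares the one-character string itself
    if l == ['w'] then 1
    else if l == ['s'] then -1
    else if l == ['d'] then 10
    else if l == ['a'] then -10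
    else 0
  else
    -- m = len(s) // 2 inlined
    solutionEffect (l.take (l.length / 2)) + solutionEffect (l.drop (l.length / 2))
termination_by l.length
decreasing_by
  · simp [List.length_take]; omega
  · simp [List.length_drop]; omega

def solution_alt (n : Int) (control : String) : Int :=
  n + solutionEffect control.toList

-- ===== PRECONDITION & SPEC =====
def Spec_solution (n : Int) (control : String) (out : Int) : Prop := out = solution_alt n control
instance (n : Int) (control : String) (out : Int) : Decidable (Spec_solution n control out) := by unfold Spec_solution; infer_instance

-- ===== CLAIM (what is proved, stated in full; the proofs are below) =====
def Claim_equal_solution : Prop := ∀ (n : Int) (control : String), Dom_solution n control → Spec_solution n control (solution n control)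

-- ===== LEMMAS AND PROOFS =====

-- A's step function
def pvStep (b : Int) (num : Char) : Int :=
  if num == 'w' then b + 1
  else if num == 's' then b - 1
  else if num == 'd' then b + 10
  else if num == 'a' then b - 10
  else b

-- each step adds a constant, so the fold shifts with its start value
theorem pv_fold_shift (l : List Char) (b : Int) :
    l.foldl pvStep b = b + l.foldl pvStep 0 := by
  induction l generalizing b with
  | nil => simp
  | cons x t ih =>
    simp only [List.foldl_cons]
    rw [ih (pvStep b x), ih (pvStep 0 x)]
    unfold pvStep
    split_ifs <;> ring

-- B's divide-and-conquer effect equals A's fold from 0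
theorem pv_effect_eq_fold (l : List Char) : solutionEffect l = l.foldl pvStep 0 := by
  by_cases h0 : l.length = 0
  · obtain rfl := List.length_eq_zero_iff.mp h0
    rw [solutionEffect]
    simp
  · by_cases h1 : l.length = 1
    · obtain ⟨c, rfl⟩ := List.length_eq_one_iff.mp h1
      rw [solutionEffect]
      simp only [List.length_cons, List.length_nil, List.foldl_cons, List.foldl_nil]
      norm_num
      unfold pvStep
      split_ifs <;> simp_all
    · rw [solutionEffect, if_neg h0, if_neg h1]
      have ht := pv_effect_eq_fold (l.take (l.length / 2))
      have hd := pv_effect_eq_fold (l.drop (l.length / 2))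
      rw [ht, hd]
      conv_rhs => rw [← List.take_append_drop (l.length / 2) l, List.foldl_append,
        pv_fold_shift]
  termination_by l.length
  decreasing_by
    · simp [List.length_take]; omega
    · simp [List.length_drop]; omega

-- ===== VERDICT (by name: the statement is the Claim_ definition above) =====
theorem solution_spec : Claim_equal_solution := by
  intro n control _
  unfold Spec_solution solution solution_alt
  rw [pv_effect_eq_fold, ← pv_fold_shift]
  rfl
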